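-- pv_equiv track=rewrite | github.com/omnp/multiply | factr_random.py | introot
-- ===== SOURCE A (Python) =====
-- def introot(z, n):
--     y = 0
--     b = z.bit_length()
--     for i in reversed(range(b)):
--         x = 2**i
--         y_ = y + x
--         if y_ ** n <= z:
--             y = y_
--     return y
-- ===== SOURCE B (Python) =====
-- def introot(z, n):
--     # Integer Newton iteration for the floor nth root (quadratic convergence:
--     # O(log bit_length) iterations instead of A's bit_length iterations).
--     if z < 1:
--         return 0
--     x = 2 ** ((z.bit_length() + n - 1) // n)
--     while True:
--         y = ((n - 1) * x + z // x ** (n - 1)) // n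
--         if x <= y:
--             return x
--         x = y
-- ===== Notes on version B (the rewrite author's own statement) =====
-- stated objective: faster
-- what changed: A builds the root bit by bit, testing one big power per bit of z; B starts from the upper bound 2^ceil(bit_length(z)/n) and runs the classical integer Newton iteration x <- ((n-1)x + z//x^(n-1))//n until it stops decreasing, which converges quadratically.
-- outside the precondition, e.g. on introot(5, 0): A returns 7, B raises ZeroDivisionError; on introot(5, -2): A returns 7, B returns -1.0
import Mathlib
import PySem

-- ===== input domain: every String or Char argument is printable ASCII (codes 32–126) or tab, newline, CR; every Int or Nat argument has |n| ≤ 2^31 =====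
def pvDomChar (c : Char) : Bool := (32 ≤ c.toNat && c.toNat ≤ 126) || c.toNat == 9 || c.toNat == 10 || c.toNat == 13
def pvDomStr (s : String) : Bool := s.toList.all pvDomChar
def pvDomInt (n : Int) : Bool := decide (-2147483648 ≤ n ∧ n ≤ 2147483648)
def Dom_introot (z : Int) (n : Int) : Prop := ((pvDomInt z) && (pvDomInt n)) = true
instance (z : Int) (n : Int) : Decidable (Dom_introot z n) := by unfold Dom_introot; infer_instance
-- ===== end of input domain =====

-- B replaces A's bit-by-bit greedy construction of the floor nth root (bit_length(z)
-- iterations, one big power each) by integer Newton iteration from an upper bound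
-- (quadratically convergent); equal on every input with n ≥ 1.

-- ===== PORT A =====
-- 'y_ ** n' is ported as '^ n.toNat', exact for the admitted inputs (Pre_ gives n ≥ 1).
def introot (z : Int) (n : Int) : Int :=
  (PySem.List.pyRange 0 (PySem.Int.bitLength z : Int) 1).reverse.foldl
    (fun y i =>
      let x : Int := 2 ^ i.toNat
      let y_ := y + x
      if y_ ^ n.toNat ≤ z then y_ else y) 0

-- ===== PORT B =====
-- The while-True loop, with a fuel parameter only to make it total in Lean
-- (the proof shows fuel x₀+1 is never exhausted: x strictly decreases and stays ≥ 1).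
-- 'x ** (n - 1)' is ported as '^ (n-1).toNat', exact for n ≥ 1.
def introotGo (z : Int) (n : Int) : Nat → Int → Int
  | 0, x => x
  | f + 1, x =>
    let y := PySem.Int.floordiv ((n - 1) * x + PySem.Int.floordiv z (x ^ (n - 1).toNat)) n
    if x ≤ y then x else introotGo z n f y

def introot_alt (z : Int) (n : Int) : Int :=
  if z < 1 then 0
  else
    let x0 : Int := 2 ^ (PySem.Int.floordiv ((PySem.Int.bitLength z : Int) + n - 1) n).toNat
    introotGo z n (x0.toNat + 1) x0

-- ===== PRECONDITION & SPEC =====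
-- Pre_ excludes n ≤ 0, outside the nth-root's natural domain: for n = 0 B raises
-- ZeroDivisionError (A returns 2^bit_length(z) - 1), and for n < 0 both programs compute
-- with Python floats (B can return a float such as -1.0, not an int).
def Pre_introot (z : Int) (n : Int) : Prop := 1 ≤ n
instance (z : Int) (n : Int) : Decidable (Pre_introot z n) := by unfold Pre_introot; infer_instance
def pvWitness_introot : Int × Int := (100, 2)

def Spec_introot (z : Int) (n : Int) (out : Int) : Prop := out = introot_alt z n
instance (z : Int) (n : Int) (out : Int) : Decidable (Spec_introot z n out) := by unfold Spec_introot; infer_instance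

-- ===== CLAIM (what is proved, stated in full; the proofs are below) =====
def Claim_equal_introot : Prop := ∀ (z : Int) (n : Int), Dom_introot z n → Pre_introot z n → Spec_introot z n (introot z n)

-- ===== LEMMAS AND PROOFS =====

-- Strict monotonicity consequences of the bracketing r^m ≤ z < (r+1)^m.
theorem pvPowBracket_le {z r x : Int} {m : Nat} (hm : m ≠ 0) (hr : 0 ≤ r)
    (hzr : z < (r + 1) ^ m) (hx : 0 ≤ x) (hxz : x ^ m ≤ z) : x ≤ r := by
  by_contra h
  have h1 : r + 1 ≤ x := by omega
  have := pow_le_pow_left₀ (by omega : (0:Int) ≤ r + 1) h1 m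
  linarith

-- Integer weighted AM–GM: (m+1)·b·a^m ≤ b^(m+1) + m·a^(m+1) for a, b ≥ 0.
theorem pvAmgm (a b : Int) (ha : 0 ≤ a) (hb : 0 ≤ b) :
    ∀ m : Nat, ((m : Int) + 1) * b * a ^ m ≤ b ^ (m + 1) + (m : Int) * a ^ (m + 1) := by
  intro m
  induction m with
  | zero => simp
  | succ k ih =>
    have hmul : ((k : Int) + 1) * b * a ^ k * a ≤ (b ^ (k + 1) + (k : Int) * a ^ (k + 1)) * a :=
      mul_le_mul_of_nonneg_right ih ha
    have hsign : 0 ≤ (b - a) * (b ^ (k + 1) - a ^ (k + 1)) := by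
      rcases le_total a b with h | h
      · exact mul_nonneg (by linarith)
          (by have := pow_le_pow_left₀ ha h (k + 1); linarith)
      · have hp := pow_le_pow_left₀ hb h (k + 1)
        have h2 : 0 ≤ (a - b) * (a ^ (k + 1) - b ^ (k + 1)) :=
          mul_nonneg (by linarith) (by linarith)
        nlinarith [h2]
    have e1 : (b - a) * (b ^ (k + 1) - a ^ (k + 1))
        = b ^ (k + 2) + a ^ (k + 2) - b ^ (k + 1) * a - b * a ^ (k + 1) := by ring
    have h3 : b ^ (k + 1) * a + b * a ^ (k + 1) ≤ b ^ (k + 2) + a ^ (k + 2) := by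
      rw [e1] at hsign; linarith
    have e2 : ((k : Int) + 1) * b * a ^ k * a = ((k : Int) + 1) * b * a ^ (k + 1) := by ring
    have e3 : (b ^ (k + 1) + (k : Int) * a ^ (k + 1)) * a = b ^ (k + 1) * a + (k : Int) * a ^ (k + 2) := by
      ring
    have hmul' : ((k : Int) + 1) * b * a ^ (k + 1) ≤ b ^ (k + 1) * a + (k : Int) * a ^ (k + 2) := by
      rw [e2, e3] at hmul; exact hmul
    push_cast
    nlinarith [hmul', h3]

-- A's loop: fold over the reversed range, rephrased over Nat bit indices.
def pvStep (z : Int) (m : Nat) (y : Int) (k : Nat) : Int :=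
  if (y + 2 ^ k) ^ m ≤ z then y + 2 ^ k else y

theorem pvFold_eq (z n : Int) (b : Nat) :
    (PySem.List.pyRange 0 (b : Int) 1).reverse.foldl
      (fun y i =>
        let x : Int := 2 ^ i.toNat
        let y_ := y + x
        if y_ ^ n.toNat ≤ z then y_ else y) 0
    = (List.range b).reverse.foldl (pvStep z n.toNat) 0 := by
  rw [PySem.List.pyRange_one]
  simp only [sub_zero, Int.toNat_natCast, zero_add, ← List.map_reverse, List.foldl_map]
  rfl

-- Invariant of A's greedy loop: if y^m ≤ z < (y+2^i)^m before the bits i-1..0 are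
-- processed, the final value y' satisfies y ≤ y' and y'^m ≤ z < (y'+1)^m.
theorem pvA_inv (z : Int) (m : Nat) :
    ∀ (i : Nat) (y : Int), 0 ≤ y → y ^ m ≤ z → z < (y + 2 ^ i) ^ m →
      0 ≤ (List.range i).reverse.foldl (pvStep z m) y ∧
      ((List.range i).reverse.foldl (pvStep z m) y) ^ m ≤ z ∧
      z < ((List.range i).reverse.foldl (pvStep z m) y + 1) ^ m := by
  intro i
  induction i with
  | zero => intro y h0 h1 h2; simpa using ⟨h0, h1, by simpa using h2⟩
  | succ k ih =>
    intro y h0 h1 h2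
    rw [List.range_succ, List.reverse_append, List.reverse_singleton, List.singleton_append,
      List.foldl_cons]
    by_cases hc : (y + 2 ^ k) ^ m ≤ z
    · have : pvStep z m y k = y + 2 ^ k := by simp [pvStep, hc]
      rw [this]
      refine ih (y + 2 ^ k) (by positivity) hc ?_
      have : y + 2 ^ k + 2 ^ k = y + 2 ^ (k + 1) := by ring
      rw [this]; exact h2
    · have : pvStep z m y k = y := by simp [pvStep, hc]
      rw [this]
      exact ih y h0 h1 (by omega)

-- For z ≤ 0 the greedy loop never accepts a bit.
theorem pvA_zero (z : Int) (m : Nat) (hm : m ≠ 0) (hz : z < 1) :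
    ∀ l : List Nat, l.foldl (pvStep z m) 0 = 0 := by
  intro l
  induction l with
  | nil => rfl
  | cons k t ih =>
    have h0 : (0 : Int) < 2 ^ k := by positivity
    have hp : (1 : Int) ≤ (0 + 2 ^ k) ^ m := by
      calc (1:Int) = 1 ^ m := (one_pow m).symm
        _ ≤ (0 + 2 ^ k) ^ m := pow_le_pow_left₀ (by norm_num) (by omega) m
    have hs : pvStep z m 0 k = 0 := by
      unfold pvStep; rw [if_neg (by linarith)]
    rw [List.foldl_cons, hs, ih]

-- z lies below 2^bit_length(z) for z ≥ 1.
theorem pvBitLen (z : Int) (hz : 1 ≤ z) : z < 2 ^ PySem.Int.bitLength z := by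
  have h := PySem.Int.lt_two_pow_bitLength z
  have hz' : (z.natAbs : Int) = z := Int.natAbs_of_nonneg (by omega)
  calc z = (z.natAbs : Int) := hz'.symm
    _ < ((2 ^ PySem.Int.bitLength z : Nat) : Int) := by exact_mod_cast h
    _ = 2 ^ PySem.Int.bitLength z := by push_cast; ring

-- A's result satisfies the root bracketing (z ≥ 1, m ≥ 1).
theorem pvA_bracket (z : Int) (m : Nat) (hz : 1 ≤ z) (hm : m ≠ 0) :
    0 ≤ (List.range (PySem.Int.bitLength z)).reverse.foldl (pvStep z m) 0 ∧
    ((List.range (PySem.Int.bitLength z)).reverse.foldl (pvStep z m) 0) ^ m ≤ z ∧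
    z < ((List.range (PySem.Int.bitLength z)).reverse.foldl (pvStep z m) 0 + 1) ^ m := by
  refine pvA_inv z m (PySem.Int.bitLength z) 0 le_rfl (by simp [zero_pow hm]; omega) ?_
  have h1 : z < 2 ^ PySem.Int.bitLength z := pvBitLen z hz
  have h2 : (2 : Int) ^ PySem.Int.bitLength z ≤ (2 ^ PySem.Int.bitLength z) ^ m :=
    le_self_pow₀ (by nlinarith [pow_pos (by norm_num : (0:Int) < 2) (PySem.Int.bitLength z)]) hm
  calc z < 2 ^ PySem.Int.bitLength z := h1
    _ ≤ (2 ^ PySem.Int.bitLength z) ^ m := h2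
    _ = (0 + 2 ^ PySem.Int.bitLength z) ^ m := by ring_nf

-- Newton step stays at or above the root: y := ((n-1)x + z//x^(n-1)) // n ≥ r.
theorem pvNewton_ge (z r x : Int) (d : Nat) (hr : 1 ≤ r) (hx : 1 ≤ x)
    (hrz : r ^ (d + 1) ≤ z) :
    r ≤ PySem.Int.floordiv (((d : Int) + 1 - 1) * x + PySem.Int.floordiv z (x ^ d)) ((d : Int) + 1) := by
  have hxd : (0 : Int) < x ^ d := by positivity
  have amgm := pvAmgm x r (by omega) (by omega) d
  -- (d+1)·r - d·x ≤ z // x^d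
  have he : x ^ (d + 1) = x ^ d * x := pow_succ x d
  have h1 : ((d : Int) + 1) * r - (d : Int) * x ≤ PySem.Int.floordiv z (x ^ d) := by
    rw [PySem.Int.le_floordiv_iff_mul_le hxd]
    nlinarith [amgm, hrz, he]
  rw [PySem.Int.le_floordiv_iff_mul_le (by positivity : (0:Int) < (d : Int) + 1)]
  nlinarith [h1]

-- When the Newton step does not decrease, the current x already satisfies x^n ≤ z.
theorem pvNewton_stop (z x : Int) (d : Nat) (hx : 1 ≤ x)
    (h : x ≤ PySem.Int.floordiv (((d : Int) + 1 - 1) * x + PySem.Int.floordiv z (x ^ d)) ((d : Int) + 1)) :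
    x ^ (d + 1) ≤ z := by
  have hxd : (0 : Int) < x ^ d := by positivity
  have h1 : x * ((d : Int) + 1) ≤ ((d : Int) + 1 - 1) * x + PySem.Int.floordiv z (x ^ d) := by
    rw [← PySem.Int.le_floordiv_iff_mul_le (by positivity : (0:Int) < (d : Int) + 1)]
    exact h
  have h2 : x ≤ PySem.Int.floordiv z (x ^ d) := by nlinarith
  rw [PySem.Int.le_floordiv_iff_mul_le hxd] at h2
  calc x ^ (d + 1) = x * x ^ d := by ring
    _ ≤ z := h2

-- Newton's loop returns the bracketed root from any start x ≥ r, given enough fuel.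
theorem pvGo_eq (z r : Int) (d : Nat) (hr : 1 ≤ r)
    (hrz : r ^ (d + 1) ≤ z) (hzr : z < (r + 1) ^ (d + 1)) :
    ∀ (f : Nat) (x : Int), r ≤ x → x.toNat ≤ f →
      introotGo z ((d : Int) + 1) f x = r := by
  intro f
  induction f with
  | zero => intro x hx hf; omega
  | succ k ih =>
    intro x hx hf
    have hx1 : 1 ≤ x := le_trans hr hx
    have hd : (((d : Int) + 1 - 1).toNat) = d := by omega
    rw [introotGo]
    simp only [hd]
    by_cases hc : x ≤ PySem.Int.floordiv (((d : Int) + 1 - 1) * x + PySem.Int.floordiv z (x ^ d)) ((d : Int) + 1)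
    · rw [if_pos hc]
      have hle : x ≤ r := pvPowBracket_le (Nat.succ_ne_zero d) (by omega) hzr (by omega)
        (pvNewton_stop z x d hx1 hc)
      omega
    · rw [if_neg hc]
      push_neg at hc
      have hge : r ≤ PySem.Int.floordiv (((d : Int) + 1 - 1) * x + PySem.Int.floordiv z (x ^ d)) ((d : Int) + 1) :=
        pvNewton_ge z r x d hr hx1 hrz
      exact ih _ hge (by omega)

-- The initial iterate 2^⌈b/n⌉ is at least the root.
theorem pvInit_ge (z r : Int) (d : Nat) (hz : 1 ≤ z) (hr : 0 ≤ r) (hrz : r ^ (d + 1) ≤ z) :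
    r ≤ 2 ^ (PySem.Int.floordiv ((PySem.Int.bitLength z : Int) + ((d : Int) + 1) - 1) ((d : Int) + 1)).toNat := by
  set b : Nat := PySem.Int.bitLength z with hb
  set n : Int := (d : Int) + 1 with hn
  set c : Int := PySem.Int.floordiv ((b : Int) + n - 1) n with hc
  have hnpos : (0 : Int) < n := by positivity
  -- n * c ≥ b
  have hcb : (b : Int) ≤ n * c := by
    have h1 : (b : Int) + n - 1 < (c + 1) * n := by
      rw [← PySem.Int.floordiv_lt_iff_lt_mul hnpos]; omega
    nlinarith
  have hbn : (0 : Int) ≤ (b : Int) := Nat.cast_nonneg b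
  have hc0 : 0 ≤ c := by
    rw [hc, PySem.Int.le_floordiv_iff_mul_le hnpos]
    nlinarith
  -- r^(d+1) ≤ z < 2^b ≤ (2^c)^(d+1), hence r < 2^c
  have h2b : z < 2 ^ b := pvBitLen z hz
  have hpow : (2 : Int) ^ b ≤ (2 ^ c.toNat) ^ (d + 1) := by
    rw [← pow_mul]
    refine pow_le_pow_right₀ (by norm_num) ?_
    have : (b : Int) ≤ (c.toNat : Int) * ((d : Int) + 1) := by
      rw [Int.toNat_of_nonneg hc0]; nlinarith
    exact_mod_cast this
  have hstrict : r ^ (d + 1) < (2 ^ c.toNat) ^ (d + 1) := by linarith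
  by_contra h
  push_neg at h
  have := pow_le_pow_left₀ (by positivity : (0:Int) ≤ 2 ^ c.toNat) h.le (d + 1)
  linarith

-- ===== VERDICT (by name: the statement is the Claim_ definition above) =====
theorem introot_spec : Claim_equal_introot := by
  intro z n _ hn
  unfold Pre_introot at hn
  unfold Spec_introot
  obtain ⟨d, hd⟩ : ∃ d : Nat, n = (d : Int) + 1 :=
    ⟨(n - 1).toNat, by omega⟩
  subst hd
  have hm : ((d : Int) + 1).toNat = d + 1 := by omega
  unfold introot introot_alt
  rw [pvFold_eq, hm]
  by_cases hz : z < 1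
  · rw [if_pos hz, pvA_zero z (d + 1) (Nat.succ_ne_zero d) hz]
  · push_neg at hz
    rw [if_neg (by omega)]
    obtain ⟨h0, h1, h2⟩ := pvA_bracket z (d + 1) hz (Nat.succ_ne_zero d)
    set r : Int := (List.range (PySem.Int.bitLength z)).reverse.foldl (pvStep z (d + 1)) 0 with hrdef
    have hr1 : 1 ≤ r := by
      rcases lt_or_ge r 1 with h | h
      · exfalso
        have hr0 : r = 0 := by omega
        rw [hr0] at h2
        simp at h2
        omega
      · exact h
    exact (pvGo_eq z r d hr1 h1 h2 _ _ (pvInit_ge z r d hz (by omega) h1) (by omega)).symm
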